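-- pv_equiv track=rewrite | github.com/dsledge1/crosswords | functions/grid_render.py | generate_clue_numbers
-- ===== SOURCE A (Python) =====
-- def generate_clue_numbers(grid):
--     clue_numbers = {}
--     number = 1
--     rows = len(grid)
--     cols = len(grid[0])
--
--     for r in range(rows):
--         for c in range(cols):
--             if grid[r][c] == '#':
--                 continue
--
--             is_across_start = (
--                 c == 0 or grid[r][c-1] == '#'
--             ) and (c + 1 < cols and grid[r][c+1] != '#')
--
--             is_down_start = (
--                 r == 0 or grid[r-1][c] == '#'
--             ) and (r + 1 < rows and grid[r+1][c] != '#')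
--
--             if is_across_start or is_down_start:
--                 clue_numbers[(r, c)] = number
--                 number += 1
--
--     return clue_numbers
-- ===== SOURCE B (Python) =====
-- def generate_clue_numbers(grid):
--     rows = len(grid)
--     cols = len(grid[0])
--
--     def line_starts(line):
--         # a cell starts a word in this line iff, with '#'-padding at both ends,
--         # it is open, its left neighbor is blocked and its right neighbor is open
--         lefts = ['#'] + line[:-1]
--         rights = line[1:] + ['#']
--         return [i for i, (lf, x) in enumerate(zip(lefts, zip(line, rights)))
--                 if x[0] != '#' and lf == '#' and x[1] != '#']
--
--     cells = set()
--     for r in range(rows):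
--         for c in line_starts([grid[r][c] for c in range(cols)]):
--             cells.add((r, c))
--     for c in range(cols):
--         for r in line_starts([grid[r][c] for r in range(rows)]):
--             cells.add((r, c))
--     return {cell: k for k, cell in enumerate(sorted(cells), 1)}
-- ===== Notes on version B (the rewrite author's own statement) =====
-- stated objective: alternative
-- what changed: B reduces the problem to a one-dimensional helper: word starts in a single line are found by zipping the line with its '#'-padded left and right shifts, the helper is applied to every row and to every extracted column, the results are unioned into a set and the numbering is produced afterwards by sorting the start cells row-major and enumerating from 1, whereas A tests both neighbor conditions inline in one nested pass with a running counter.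
import Mathlib
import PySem

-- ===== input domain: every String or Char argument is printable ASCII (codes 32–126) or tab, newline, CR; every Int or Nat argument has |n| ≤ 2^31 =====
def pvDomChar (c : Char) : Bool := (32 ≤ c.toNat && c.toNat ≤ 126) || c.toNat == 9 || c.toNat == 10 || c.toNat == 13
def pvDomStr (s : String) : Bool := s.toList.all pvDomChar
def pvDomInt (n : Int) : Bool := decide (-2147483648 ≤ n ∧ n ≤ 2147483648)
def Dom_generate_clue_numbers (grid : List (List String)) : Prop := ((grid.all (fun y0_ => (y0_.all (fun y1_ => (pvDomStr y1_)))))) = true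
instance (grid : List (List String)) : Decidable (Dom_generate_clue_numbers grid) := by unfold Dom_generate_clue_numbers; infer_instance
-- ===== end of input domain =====

-- B finds word starts per LINE by zipping each line with its '#'-padded shifts, applies that helper
-- to all rows and all extracted columns, then sorts the collected start cells and numbers them;
-- objective: alternative (same asymptotic cost, different decomposition).

-- ===== PORT A =====
-- Dict keys (r, c) are strictly increasing in row-major order, hence always fresh: the dict
-- insertion 'clue_numbers[(r, c)] = number' is an append, and the dict is the accumulated list.
def generate_clue_numbers (grid : List (List String)) : List (Int × Int × Int) :=
  let rows : Int := grid.length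
  let cols : Int := (PySem.List.pyGetD grid 0 []).length
  let res :=
    (PySem.List.pyRange 0 rows 1).foldl (fun st r =>
      (PySem.List.pyRange 0 cols 1).foldl (fun st c =>
        let cell := PySem.List.pyGetD (PySem.List.pyGetD grid r []) c ""
        if cell == "#" then st
        else
          let is_across_start :=
            (c == 0 || PySem.List.pyGetD (PySem.List.pyGetD grid r []) (c - 1) "" == "#")
            && (decide (c + 1 < cols) && PySem.List.pyGetD (PySem.List.pyGetD grid r []) (c + 1) "" != "#")
          let is_down_start :=
            (r == 0 || PySem.List.pyGetD (PySem.List.pyGetD grid (r - 1) []) c "" == "#")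
            && (decide (r + 1 < rows) && PySem.List.pyGetD (PySem.List.pyGetD grid (r + 1) []) c "" != "#")
          if is_across_start || is_down_start then (st.1 ++ [(r, c, st.2)], st.2 + 1) else st) st)
      (([] : List (Int × Int × Int)), (1 : Int))
  res.1

-- ===== PORT B =====
-- line_starts(line): indices whose cell is open, padded-left neighbor is '#', padded-right is open
def pvLineStarts (line : List String) : List Int :=
  let lefts := "#" :: line.dropLast
  let rights := line.drop 1 ++ ["#"]
  (PySem.List.enumerate (lefts.zip (line.zip rights)) 0).filterMap
    (fun q => if q.2.2.1 != "#" && q.2.1 == "#" && q.2.2.2 != "#" then some q.1 else none)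

def generate_clue_numbers_alt (grid : List (List String)) : List (Int × Int × Int) :=
  let rows : Int := grid.length
  let cols : Int := (PySem.List.pyGetD grid 0 []).length
  let cells1 : PySem.Set (Int × Int) :=
    (PySem.List.pyRange 0 rows 1).foldl (fun s r =>
      (pvLineStarts ((PySem.List.pyRange 0 cols 1).map (fun c =>
          PySem.List.pyGetD (PySem.List.pyGetD grid r []) c ""))).foldl
        (fun s c => PySem.Set.add s (r, c)) s) PySem.Set.empty
  let cells : PySem.Set (Int × Int) :=
    (PySem.List.pyRange 0 cols 1).foldl (fun s c =>
      (pvLineStarts ((PySem.List.pyRange 0 rows 1).map (fun r =>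
          PySem.List.pyGetD (PySem.List.pyGetD grid r []) c ""))).foldl
        (fun s r => PySem.Set.add s (r, c)) s) cells1
  (PySem.List.enumerate (PySem.List.sorted cells (fun p => (toLex p : Int ×ₗ Int))) 1).map
    (fun q => (q.2.1, q.2.2, q.1))

-- ===== PRECONDITION & SPEC =====
-- Exactly where Python A returns: grid[0] must exist and every row must reach the width of row 0
-- (a shorter row raises IndexError when its scan reaches the missing column).
def Pre_generate_clue_numbers (grid : List (List String)) : Prop :=
  grid ≠ [] ∧ ∀ row ∈ grid, (PySem.List.pyGetD grid 0 []).length ≤ row.length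
instance (grid : List (List String)) : Decidable (Pre_generate_clue_numbers grid) := by
  unfold Pre_generate_clue_numbers; infer_instance

def pvWitness_generate_clue_numbers : List (List String) :=
  [["a", "b", "#"], ["c", "d", "e"], ["#", "f", "g"]]

def Spec_generate_clue_numbers (grid : List (List String)) (out : List (Int × Int × Int)) : Prop := out = generate_clue_numbers_alt grid
instance (grid : List (List String)) (out : List (Int × Int × Int)) : Decidable (Spec_generate_clue_numbers grid out) := by unfold Spec_generate_clue_numbers; infer_instance

-- ===== CLAIM (what is proved, stated in full; the proofs are below) =====
def Claim_equal_generate_clue_numbers : Prop := ∀ (grid : List (List String)), Dom_generate_clue_numbers grid → Pre_generate_clue_numbers grid → Spec_generate_clue_numbers grid (generate_clue_numbers grid)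

-- ===== LEMMAS AND PROOFS =====

-- cell (r, c) read through the total defaults both ports use
def pvCell (grid : List (List String)) (r c : Int) : String :=
  PySem.List.pyGetD (PySem.List.pyGetD grid r []) c ""

-- across-start and down-start conditions, as port A computes them
def pvAcr (grid : List (List String)) (cols r c : Int) : Bool :=
  (c == 0 || pvCell grid r (c - 1) == "#") && (decide (c + 1 < cols) && pvCell grid r (c + 1) != "#")
def pvDwn (grid : List (List String)) (rows r c : Int) : Bool :=
  (r == 0 || pvCell grid (r - 1) c == "#") && (decide (r + 1 < rows) && pvCell grid (r + 1) c != "#")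

-- the start condition on a single line, at integer index c (what pvLineStarts detects)
def pvStartB (ln : List String) (c : Int) : Bool :=
  PySem.List.pyGetD ln c "" != "#" && (c == 0 || PySem.List.pyGetD ln (c - 1) "" == "#")
    && decide (c + 1 < (ln.length : Int)) && PySem.List.pyGetD ln (c + 1) "" != "#"

-- A's keep condition at a cell
def pvKeep (grid : List (List String)) (rows cols : Int) (p : Int × Int) : Bool :=
  !(pvCell grid p.1 p.2 == "#") && (pvAcr grid cols p.1 p.2 || pvDwn grid rows p.1 p.2)

-- the row-major list of all coordinates
def pvPairs (rows cols : Int) : List (Int × Int) :=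
  (PySem.List.pyRange 0 rows 1).flatMap (fun r => (PySem.List.pyRange 0 cols 1).map (fun c => (r, c)))

-- numbering a list of cells from 1
def pvNum (l : List (Int × Int)) : List (Int × Int × Int) :=
  (PySem.List.enumerate l 1).map (fun q => (q.2.1, q.2.2, q.1))

-- the row line and column line B extracts
def pvRowLine (grid : List (List String)) (cols r : Int) : List String :=
  (PySem.List.pyRange 0 cols 1).map (fun c => pvCell grid r c)
def pvColLine (grid : List (List String)) (rows c : Int) : List String :=
  (PySem.List.pyRange 0 rows 1).map (fun r => pvCell grid r c)

-- B's two set-building passes, named (definitionally the ones in the port)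
def pvCells1 (grid : List (List String)) : PySem.Set (Int × Int) :=
  (PySem.List.pyRange 0 (grid.length : Int) 1).foldl (fun s r =>
    (pvLineStarts (pvRowLine grid ((PySem.List.pyGetD grid 0 []).length : Int) r)).foldl
      (fun s c => PySem.Set.add s (r, c)) s) PySem.Set.empty
def pvCells (grid : List (List String)) : PySem.Set (Int × Int) :=
  (PySem.List.pyRange 0 ((PySem.List.pyGetD grid 0 []).length : Int) 1).foldl (fun s c =>
    (pvLineStarts (pvColLine grid (grid.length : Int) c)).foldl
      (fun s r => PySem.Set.add s (r, c)) s) (pvCells1 grid)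

-- a nested loop over two ranges is a loop over the pair list
theorem pv_foldl_nested {σ : Type} (rs cs : List Int) (g : σ → Int → Int → σ) (init : σ) :
    rs.foldl (fun st r => cs.foldl (fun st c => g st r c) st) init
      = (rs.flatMap (fun r => cs.map (fun c => (r, c)))).foldl (fun st p => g st p.1 p.2) init := by
  induction rs generalizing init with
  | nil => rfl
  | cons r rs ih => simp [List.foldl_append, List.foldl_map, ih]

-- the push-and-count loop produces the enumeration
theorem pv_push_fold (qs : List (Int × Int)) (out : List (Int × Int × Int)) (n : Int) :
    qs.foldl (fun st p => (st.1 ++ [(p.1, p.2, st.2)], st.2 + 1)) (out, n)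
      = (out ++ (PySem.List.enumerate qs n).map (fun q => (q.2.1, q.2.2, q.1)), n + qs.length) := by
  induction qs generalizing out n with
  | nil => simp [PySem.List.enumerate]
  | cons q qs ih => simp [PySem.List.enumerate_cons, ih]; omega

-- membership in an add-all loop over one list
theorem pv_mem_addAll {α : Type} [BEq α] [LawfulBEq α] (cs : List Int) (f : Int → α)
    (s0 : PySem.Set α) (x : α) :
    (x ∈ cs.foldl (fun s c => PySem.Set.add s (f c)) s0) ↔ x ∈ s0 ∨ ∃ c ∈ cs, x = f c := by
  induction cs generalizing s0 with
  | nil => simp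
  | cons c cs ih => simp [ih, PySem.Set.mem_add]; aesop

-- membership in the nested add-all loop (outer range, inner computed list)
theorem pv_mem_addAll2 {α : Type} [BEq α] [LawfulBEq α] (rs : List Int) (L : Int → List Int)
    (f : Int → Int → α) (s0 : PySem.Set α) (x : α) :
    (x ∈ rs.foldl (fun s r => (L r).foldl (fun s c => PySem.Set.add s (f r c)) s) s0)
      ↔ x ∈ s0 ∨ ∃ r ∈ rs, ∃ c ∈ L r, x = f r c := by
  induction rs generalizing s0 with
  | nil => simp
  | cons r rs ih =>
    rw [List.foldl_cons, ih, pv_mem_addAll]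
    constructor <;> aesop

-- nodup through the add-all loops
theorem pv_nodup_addAll {α : Type} [BEq α] [LawfulBEq α] (cs : List Int) (f : Int → α)
    (s0 : PySem.Set α) (hs : s0.Nodup) :
    (cs.foldl (fun s c => PySem.Set.add s (f c)) s0).Nodup := by
  induction cs generalizing s0 with
  | nil => exact hs
  | cons c cs ih => exact ih _ (PySem.Set.nodup_add _ _ hs)

theorem pv_nodup_addAll2 {α : Type} [BEq α] [LawfulBEq α] (rs : List Int) (L : Int → List Int)
    (f : Int → Int → α) (s0 : PySem.Set α) (hs : s0.Nodup) :
    (rs.foldl (fun s r => (L r).foldl (fun s c => PySem.Set.add s (f r c)) s) s0).Nodup := by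
  induction rs generalizing s0 with
  | nil => exact hs
  | cons r rs ih => exact ih _ (pv_nodup_addAll _ _ _ hs)

-- the filter condition pvLineStarts tests at index c, written through the zipped triple
theorem pv_cond_eq (ln : List String) (c : Int) (h0 : 0 ≤ c) (h1 : c < (ln.length : Int)) :
    ((PySem.List.pyGetD (("#" :: ln.dropLast).zip (ln.zip (ln.drop 1 ++ ["#"]))) c ("", ("", ""))).2.1 != "#"
      && (PySem.List.pyGetD (("#" :: ln.dropLast).zip (ln.zip (ln.drop 1 ++ ["#"]))) c ("", ("", ""))).1 == "#"
      && (PySem.List.pyGetD (("#" :: ln.dropLast).zip (ln.zip (ln.drop 1 ++ ["#"]))) c ("", ("", ""))).2.2 != "#")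
      = pvStartB ln c := by
  have hn : c.toNat < ln.length := by omega
  rw [PySem.List.pyGetD_eq_getElem _ _ h0 (by simp [List.length_zip]; omega)]
  rw [List.getElem_zip, List.getElem_zip]
  rw [pvStartB, PySem.List.pyGetD_eq_getElem _ _ h0 h1]
  by_cases hlast : c.toNat + 1 < ln.length
  · -- right neighbor inside the line
    have hr : ((ln.drop 1 ++ ["#"])[c.toNat]'(by simp; omega)) = (ln[c.toNat + 1]'hlast) := by
      rw [List.getElem_append_left (by simp; omega)]
      simp
    have e2 : (c + 1).toNat = c.toNat + 1 := by omega
    have e3 : (decide (c + 1 < (ln.length : Int))) = true := by simp; omega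
    rw [PySem.List.pyGetD_eq_getElem ln (i := c + 1) "" (by omega) (by omega), e3]
    simp only [e2, hr]
    by_cases hc0 : c = 0
    · have hk0 : c.toNat = 0 := by omega
      have e4 : (c == 0) = true := by simp [hc0]
      have hl : (("#" :: ln.dropLast)[c.toNat]'(by simp; omega)) = "#" := by
        simp only [hk0, List.getElem_cons_zero]
      simp only [e4, hl]
      cases hA : (ln[c.toNat] != "#") <;> simp
    · have e4 : (c == 0) = false := by simp [hc0]
      rw [PySem.List.pyGetD_eq_getElem ln (i := c - 1) "" (by omega) (by omega)]
      have e1 : (c - 1).toNat = c.toNat - 1 := by omega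
      have hl : (("#" :: ln.dropLast)[c.toNat]'(by simp; omega))
          = (ln[c.toNat - 1]'(by omega)) := by
        rcases Nat.exists_eq_succ_of_ne_zero (by omega : c.toNat ≠ 0) with ⟨k, hk⟩
        simp only [hk, List.getElem_cons_succ, Nat.succ_sub_one]
        rw [List.getElem_dropLast]
      simp only [e1, e4, hl, Bool.false_or]
      cases hA : (ln[c.toNat] != "#") <;> cases hB : (ln[c.toNat - 1] == "#") <;>
        cases hD : (ln[c.toNat + 1] != "#") <;> simp_all
  · -- c is the last index: right pad is '#', both sides false
    have hr : ((ln.drop 1 ++ ["#"])[c.toNat]'(by simp; omega)) = "#" := by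
      rw [List.getElem_append_right (by simp; omega)]
      simp
    have e3 : (decide (c + 1 < (ln.length : Int))) = false := by simp; omega
    rw [e3, hr]
    simp

-- pvLineStarts characterised: membership = the start condition, inside the line
theorem pv_mem_lineStarts (ln : List String) (c : Int) :
    c ∈ pvLineStarts ln ↔ (0 ≤ c ∧ c < (ln.length : Int)) ∧ pvStartB ln c = true := by
  have hZlen : ((("#" :: ln.dropLast).zip (ln.zip (ln.drop 1 ++ ["#"]))).length : Int) = (ln.length : Int) := by
    simp [List.length_zip]; omega
  rw [pvLineStarts]
  rw [PySem.List.enumerate_eq_map_pyRange _ ("", ("", "")), List.filterMap_map, List.mem_filterMap]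
  constructor
  · rintro ⟨j, hj, hif⟩
    rw [PySem.List.mem_pyRange_one] at hj
    simp only [PySem.List.len_eq, hZlen] at hj
    simp only [Function.comp] at hif
    split at hif
    · rename_i hcond
      have hjc : j = c := by injection hif
      subst hjc
      refine ⟨⟨hj.1, hj.2⟩, ?_⟩
      rw [← pv_cond_eq ln j hj.1 hj.2]
      exact hcond
    · exact absurd hif (by simp)
  · rintro ⟨⟨hc0, hc1⟩, hst⟩
    refine ⟨c, ?_, ?_⟩
    · rw [PySem.List.mem_pyRange_one]
      simp only [PySem.List.len_eq, hZlen]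
      exact ⟨hc0, hc1⟩
    · simp only [Function.comp]
      rw [if_pos]
      rw [pv_cond_eq ln c hc0 hc1]
      exact hst

-- pvStartB on a comprehension line [f(k) for k in range(n)]
theorem pv_startB_map (n : Nat) (f : Int → String) (c : Int) (h0 : 0 ≤ c) (h1 : c < (n : Int)) :
    pvStartB ((PySem.List.pyRange 0 (n : Int) 1).map f) c
      = (f c != "#" && ((c == 0 || f (c - 1) == "#") && (decide (c + 1 < (n : Int)) && f (c + 1) != "#"))) := by
  have hlen : ((((PySem.List.pyRange 0 (n : Int) 1).map f).length : Nat) : Int) = (n : Int) := by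
    simp [PySem.List.length_pyRange_one]
  rw [pvStartB, hlen]
  rw [PySem.List.pyGetD_map_pyRange_of_nonneg f (n : Int) c "" h0 h1]
  by_cases h2 : c + 1 < (n : Int)
  · rw [PySem.List.pyGetD_map_pyRange_of_nonneg f (n : Int) (c + 1) "" (by omega) h2]
    by_cases hc0 : c = 0
    · simp [hc0, Bool.and_assoc]
    · rw [PySem.List.pyGetD_map_pyRange_of_nonneg f (n : Int) (c - 1) "" (by omega) (by omega)]
      have e : (c == 0) = false := by simp [hc0]
      rw [e]
      simp [Bool.and_assoc]
  · have e : decide (c + 1 < (n : Int)) = false := by simp; omega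
    rw [e]
    simp


-- A's keep condition splits into the two per-line start conditions
theorem pv_keep_split (grid : List (List String)) (rows cols r c : Int) :
    pvKeep grid rows cols (r, c)
      = ((pvCell grid r c != "#" && pvAcr grid cols r c)
          || (pvCell grid r c != "#" && pvDwn grid rows r c)) := by
  simp [pvKeep, Bool.and_or_distrib_left, bne]

-- the start condition on the extracted row line is A's across condition
theorem pv_start_row (grid : List (List String)) (r c : Int)
    (hc : 0 ≤ c) (hlt : c < ((PySem.List.pyGetD grid 0 []).length : Int)) :
    pvStartB (pvRowLine grid ((PySem.List.pyGetD grid 0 []).length : Int) r) c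
      = (pvCell grid r c != "#" && pvAcr grid ((PySem.List.pyGetD grid 0 []).length : Int) r c) := by
  rw [pvRowLine, pvAcr]
  exact pv_startB_map (PySem.List.pyGetD grid 0 []).length (fun c => pvCell grid r c) c hc hlt

-- the start condition on the extracted column line is A's down condition
theorem pv_start_col (grid : List (List String)) (r c : Int)
    (hr : 0 ≤ r) (hlt : r < (grid.length : Int)) :
    pvStartB (pvColLine grid (grid.length : Int) c) r
      = (pvCell grid r c != "#" && pvDwn grid (grid.length : Int) r c) := by
  rw [pvColLine, pvDwn]
  exact pv_startB_map grid.length (fun r => pvCell grid r c) r hr hlt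

-- membership in the row-major pair list
theorem pv_mem_pairs (rows cols : Int) (x : Int × Int) :
    x ∈ pvPairs rows cols ↔ (0 ≤ x.1 ∧ x.1 < rows) ∧ (0 ≤ x.2 ∧ x.2 < cols) := by
  obtain ⟨r, c⟩ := x
  simp [pvPairs, List.mem_flatMap, PySem.List.mem_pyRange_one]

-- the row-major pair list is strictly increasing in the lexicographic order
theorem pv_pairs_pairwise (rows cols : Int) :
    (pvPairs rows cols).Pairwise (fun a b => (toLex a : Lex (Int × Int)) < toLex b) := by
  unfold pvPairs
  rw [List.pairwise_flatMap]
  constructor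
  · intro r _
    rw [List.pairwise_map]
    refine (PySem.List.pairwise_lt_pyRange_one 0 cols).imp ?_
    intro c1 c2 h
    exact Prod.Lex.lt_iff.mpr (Or.inr ⟨rfl, h⟩)
  · refine (PySem.List.pairwise_lt_pyRange_one 0 rows).imp ?_
    intro a b hab x hx y hy
    simp only [List.mem_map] at hx hy
    obtain ⟨c1, -, rfl⟩ := hx
    obtain ⟨c2, -, rfl⟩ := hy
    exact Prod.Lex.lt_iff.mpr (Or.inl hab)

-- characterisation of port A
theorem pv_A_eq (grid : List (List String)) :
    generate_clue_numbers grid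
      = pvNum ((pvPairs (grid.length : Int) ((PySem.List.pyGetD grid 0 []).length : Int)).filter
          (pvKeep grid (grid.length : Int) ((PySem.List.pyGetD grid 0 []).length : Int))) := by
  have h0 : generate_clue_numbers grid
      = ((PySem.List.pyRange 0 (grid.length : Int) 1).foldl (fun st r =>
          (PySem.List.pyRange 0 ((PySem.List.pyGetD grid 0 []).length : Int) 1).foldl (fun st c =>
            if pvCell grid r c == "#" then st
            else if pvAcr grid ((PySem.List.pyGetD grid 0 []).length : Int) r c
                    || pvDwn grid (grid.length : Int) r c
                 then (st.1 ++ [(r, c, st.2)], st.2 + 1) else st) st)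
          (([] : List (Int × Int × Int)), (1 : Int))).1 := rfl
  rw [h0, pv_foldl_nested]
  have hstep : ∀ (st : List (Int × Int × Int) × Int) (p : Int × Int),
      (if pvCell grid p.1 p.2 == "#" then st
       else if pvAcr grid ((PySem.List.pyGetD grid 0 []).length : Int) p.1 p.2
               || pvDwn grid (grid.length : Int) p.1 p.2
            then (st.1 ++ [(p.1, p.2, st.2)], st.2 + 1) else st)
        = if pvKeep grid (grid.length : Int) ((PySem.List.pyGetD grid 0 []).length : Int) p
          then (st.1 ++ [(p.1, p.2, st.2)], st.2 + 1) else st := by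
    intro st p
    unfold pvKeep
    by_cases h : pvCell grid p.1 p.2 == "#" <;> simp [h]
  simp only [hstep]
  rw [PySem.List.foldl_if_eq_foldl_filter
        (p := pvKeep grid (grid.length : Int) ((PySem.List.pyGetD grid 0 []).length : Int))
        (f := fun (st : List (Int × Int × Int) × Int) (p : Int × Int) =>
          (st.1 ++ [(p.1, p.2, st.2)], st.2 + 1)),
      pv_push_fold]
  simp [pvNum, pvPairs]

-- membership in B's start set
theorem pv_mem_cells (grid : List (List String)) (x : Int × Int) :
    x ∈ pvCells grid
      ↔ x ∈ pvPairs (grid.length : Int) ((PySem.List.pyGetD grid 0 []).length : Int)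
          ∧ pvKeep grid (grid.length : Int) ((PySem.List.pyGetD grid 0 []).length : Int) x = true := by
  obtain ⟨r, c⟩ := x
  have hrowlen : ∀ r' : Int,
      (((pvRowLine grid ((PySem.List.pyGetD grid 0 []).length : Int) r').length : Nat) : Int)
        = ((PySem.List.pyGetD grid 0 []).length : Int) := by
    intro r'; simp [pvRowLine, PySem.List.length_pyRange_one]
  have hcollen : ∀ c' : Int,
      (((pvColLine grid (grid.length : Int) c').length : Nat) : Int) = (grid.length : Int) := by
    intro c'; simp [pvColLine, PySem.List.length_pyRange_one]
  rw [pvCells, pv_mem_addAll2, pvCells1, pv_mem_addAll2, pv_mem_pairs, pv_keep_split]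
  simp only [PySem.Set.empty, List.not_mem_nil, false_or, PySem.List.mem_pyRange_one]
  constructor
  · rintro ((⟨r', ⟨hr1, hr2⟩, c', hc', heq⟩) | ⟨c', ⟨hc1, hc2⟩, r', hr', heq⟩)
    · cases heq
      rw [pv_mem_lineStarts, hrowlen] at hc'
      obtain ⟨⟨hc1, hc2⟩, hst⟩ := hc'
      rw [pv_start_row grid r c hc1 hc2] at hst
      exact ⟨⟨⟨hr1, hr2⟩, hc1, hc2⟩, by simp [hst]⟩
    · cases heq
      rw [pv_mem_lineStarts, hcollen] at hr'
      obtain ⟨⟨hr1, hr2⟩, hst⟩ := hr'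
      rw [pv_start_col grid r c hr1 hr2] at hst
      exact ⟨⟨⟨hr1, hr2⟩, hc1, hc2⟩, by simp [hst]⟩
  · rintro ⟨⟨⟨hr1, hr2⟩, hc1, hc2⟩, hk⟩
    rcases Bool.or_eq_true_iff.mp hk with h | h
    · refine Or.inl ⟨r, ⟨hr1, hr2⟩, c, ?_, rfl⟩
      rw [pv_mem_lineStarts, hrowlen]
      exact ⟨⟨hc1, hc2⟩, by rw [pv_start_row grid r c hc1 hc2]; exact h⟩
    · refine Or.inr ⟨c, ⟨hc1, hc2⟩, r, ?_, rfl⟩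
      rw [pv_mem_lineStarts, hcollen]
      exact ⟨⟨hr1, hr2⟩, by rw [pv_start_col grid r c hr1 hr2]; exact h⟩

-- B's start set has no duplicates
theorem pv_nodup_cells (grid : List (List String)) : (pvCells grid).Nodup := by
  rw [pvCells, pvCells1]
  apply pv_nodup_addAll2 (f := fun c r => ((r, c) : Int × Int))
  apply pv_nodup_addAll2 (f := fun r c => ((r, c) : Int × Int))
  exact List.nodup_nil

-- characterisation of port B
theorem pv_B_eq (grid : List (List String)) :
    generate_clue_numbers_alt grid
      = pvNum ((pvPairs (grid.length : Int) ((PySem.List.pyGetD grid 0 []).length : Int)).filter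
          (pvKeep grid (grid.length : Int) ((PySem.List.pyGetD grid 0 []).length : Int))) := by
  have h0 : generate_clue_numbers_alt grid
      = pvNum (PySem.List.sorted (pvCells grid) (fun p => (toLex p : Lex (Int × Int)))) := rfl
  rw [h0]
  congr 1
  have hpwL : ((pvPairs (grid.length : Int) ((PySem.List.pyGetD grid 0 []).length : Int)).filter
      (pvKeep grid (grid.length : Int) ((PySem.List.pyGetD grid 0 []).length : Int))).Pairwise
        (fun a b => (toLex a : Lex (Int × Int)) < toLex b) :=
    (pv_pairs_pairwise _ _).filter _
  apply PySem.List.sorted_eq_of_perm_of_pairwise_lt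
  · rw [List.perm_ext_iff_of_nodup (hpwL.imp (fun h heq => by subst heq; exact lt_irrefl _ h))
        (pv_nodup_cells grid)]
    intro x
    rw [List.mem_filter, pv_mem_cells]
  · exact hpwL

-- ===== VERDICT (by name: the statement is the Claim_ definition above) =====
theorem generate_clue_numbers_spec : Claim_equal_generate_clue_numbers := by
  intro grid _ _
  unfold Spec_generate_clue_numbers
  rw [pv_A_eq, pv_B_eq]
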